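-- pv_equiv track=rewrite | github.com/mochang2/coding-test | Programmers/2단계/택배 배달과 수거하기.py | getFarthestPlace
-- ===== SOURCE A (Python) =====
-- def getFarthestPlace(capacity, current_place, residues):
--     while current_place != 0 and capacity > 0: # 해야 할 일이 끝나지 않았고, 더 배달하거나 픽업할 수 있다면
--         affordable_amount = min(capacity, residues[current_place - 1])
--         capacity -= affordable_amount
--         residues[current_place - 1] -= affordable_amount
--
--         while current_place != 0 and residues[current_place - 1] == 0: # 해당 지점에서 일이 다 끝났다면, 다음 일을 해야 하는 지점 파악
--             current_place -= 1
--
--     return current_place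
-- ===== SOURCE B (Python) =====
-- def getFarthestPlace(capacity, current_place, residues):
--     # Closed-form scan over suffix sums: no simulation state, residues is not mutated.
--     if capacity <= 0:
--         return current_place
--     suffix = 0  # total workload at places strictly above j
--     for j in range(current_place, 0, -1):
--         r = residues[j - 1]
--         if r != 0 and (suffix >= capacity or suffix + r > capacity):
--             return j
--         suffix += r
--     return 0
-- ===== Notes on version B (the rewrite author's own statement) =====
-- stated objective: alternative
-- what changed: A simulates consumption by mutating residues and re-scanning for zeros; B computes the answer by a single non-mutating scan over running suffix sums with a closed-form stop condition (r != 0 and (suffix >= capacity or suffix + r > capacity)). Pre_ excludes inputs where capacity > 0 and current_place is negative or exceeds len(residues): there A raises IndexError or returns via Python's accidental negative-index wraparound.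
-- outside the precondition, e.g. on getFarthestPlace(1, -1, [3, 4, 5]): A returns -1, B returns 0
import Mathlib
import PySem

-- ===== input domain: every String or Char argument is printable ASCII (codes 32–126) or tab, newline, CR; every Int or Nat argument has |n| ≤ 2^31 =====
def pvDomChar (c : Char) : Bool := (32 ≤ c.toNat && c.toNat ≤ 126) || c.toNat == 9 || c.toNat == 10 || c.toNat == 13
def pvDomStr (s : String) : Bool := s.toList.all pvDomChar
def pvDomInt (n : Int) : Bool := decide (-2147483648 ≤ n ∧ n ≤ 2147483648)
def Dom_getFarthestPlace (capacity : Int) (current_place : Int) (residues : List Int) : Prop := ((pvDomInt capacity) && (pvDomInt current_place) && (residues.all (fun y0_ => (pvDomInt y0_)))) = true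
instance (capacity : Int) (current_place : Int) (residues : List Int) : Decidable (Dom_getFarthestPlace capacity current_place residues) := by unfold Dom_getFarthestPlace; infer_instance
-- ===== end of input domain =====

-- B replaces A's mutate-and-rescan simulation by a non-mutating scan over running suffix sums;
-- equivalence is about the RETURN value only (A mutates `residues` in place, B does not).

-- ===== PORT A =====
-- A's inner loop: `while current_place != 0 and residues[current_place-1] == 0: current_place -= 1`.
def pvSkipA (residues : List Int) (i : Int) : Int :=
  if h : 0 < i ∧ PySem.List.pyGet? residues (i - 1) = some 0 then pvSkipA residues (i - 1) else i
termination_by i.toNat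
decreasing_by omega

theorem pvSkipA_le (residues : List Int) (i : Int) : pvSkipA residues i ≤ i := by
  induction i using pvSkipA.induct residues with
  | case1 i h ih => rw [pvSkipA]; rw [dif_pos h]; omega
  | case2 i h => rw [pvSkipA]; rw [dif_neg h]

theorem pvSkipA_step (residues : List Int) (i : Int) (h0 : 0 < i)
    (hz : PySem.List.pyGet? residues (i - 1) = some 0) :
    pvSkipA residues i = pvSkipA residues (i - 1) := by
  rw [pvSkipA]; simp [h0, hz]

theorem pvSkipA_stop (residues : List Int) (i v : Int)
    (hv : PySem.List.pyGet? residues (i - 1) = some v) (hnz : v ≠ 0) :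
    pvSkipA residues i = i := by
  rw [pvSkipA]
  have hn : ¬ (0 < i ∧ PySem.List.pyGet? residues (i - 1) = some 0) := by
    rintro ⟨-, h⟩; rw [hv] at h; exact hnz (by injection h)
  rw [dif_neg hn]

theorem pvGet_setD_self (xs : List Int) (k v : Int) (h0 : 0 ≤ k) (hk : k < (xs.length : Int)) :
    PySem.List.pyGet? (PySem.List.pySetD xs k v) k = some v := by
  rw [PySem.List.pySetD_of_nonneg _ _ h0, PySem.List.pyGet?_of_nonneg _ h0]
  rw [List.getElem?_set_self]
  omega

theorem pvGet_inrange (xs : List Int) (k : Int) (h0 : 0 ≤ k)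
    (hg : PySem.List.pyGet? xs k ≠ none) : k < (xs.length : Int) := by
  by_contra hcon
  apply hg
  rw [PySem.List.pyGet?_eq_none_iff]
  simp [PySem.Raise.InRange]
  omega

-- A's outer loop, step for step: read residues[i-1], consume min(capacity, r), write back, skip zeros.
def pvLoopA (capacity : Int) (i : Int) (residues : List Int) : Int :=
  if h : 0 < i ∧ 0 < capacity then
    match hr : PySem.List.pyGet? residues (i - 1) with
    | none => i   -- Python raises IndexError here; excluded by Pre_
    | some r =>
      let a := min capacity r
      let res' := PySem.List.pySetD residues (i - 1) (r - a)
      pvLoopA (capacity - a) (pvSkipA res' i) res'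
  else i
termination_by i.toNat * 2 + (if 0 < capacity then 1 else 0)
decreasing_by
  have hlen : i - 1 < (residues.length : Int) :=
    pvGet_inrange residues (i - 1) (by omega) (by simp [hr])
  by_cases hrc : r ≤ capacity
  · have hz : PySem.List.pyGet? (PySem.List.pySetD residues (i - 1) (r - min capacity r)) (i - 1)
        = some (r - min capacity r) :=
      pvGet_setD_self residues (i - 1) (r - min capacity r) (by omega) (by simpa using hlen)
    have hz0 : r - min capacity r = 0 := by omega
    rw [hz0] at hz
    rw [show (r - min capacity r) = 0 from by omega]
    rw [pvSkipA_step _ _ h.1 hz]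
    have hle := pvSkipA_le (PySem.List.pySetD residues (i - 1) (0 : Int)) (i - 1)
    have h1 := h.1
    split <;> omega
  · have hz : PySem.List.pyGet? (PySem.List.pySetD residues (i - 1) (r - min capacity r)) (i - 1)
        = some (r - min capacity r) :=
      pvGet_setD_self residues (i - 1) (r - min capacity r) (by omega) (by simpa using hlen)
    rw [pvSkipA_stop _ _ _ hz (by omega)]
    have h2 := h.2
    split <;> omega

def getFarthestPlace (capacity : Int) (current_place : Int) (residues : List Int) : Int :=
  pvLoopA capacity current_place residues

-- ===== PORT B =====
-- B's loop: `for j in range(current_place, 0, -1)` with running suffix sum, no mutation.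
def pvScan (capacity : Int) (suffix : Int) (j : Int) (residues : List Int) : Int :=
  if h : 0 < j then
    match PySem.List.pyGet? residues (j - 1) with
    | none => 0   -- Python raises IndexError here; excluded by Pre_
    | some r =>
      if r ≠ 0 ∧ (capacity ≤ suffix ∨ capacity < suffix + r) then j
      else pvScan capacity (suffix + r) (j - 1) residues
  else 0
termination_by j.toNat
decreasing_by omega

def getFarthestPlace_alt (capacity : Int) (current_place : Int) (residues : List Int) : Int :=
  if capacity ≤ 0 then current_place
  else pvScan capacity 0 current_place residues

-- ===== PRECONDITION & SPEC =====
-- Pre_ excludes inputs where capacity > 0 and current_place is negative or exceeds len(residues):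
-- there A either raises IndexError or returns a value only via Python's accidental negative-index wraparound.
def Pre_getFarthestPlace (capacity : Int) (current_place : Int) (residues : List Int) : Prop :=
  capacity ≤ 0 ∨ current_place = 0 ∨ (0 ≤ current_place ∧ current_place ≤ residues.length)
instance (capacity : Int) (current_place : Int) (residues : List Int) : Decidable (Pre_getFarthestPlace capacity current_place residues) := by unfold Pre_getFarthestPlace; infer_instance

def pvWitness_getFarthestPlace : Int × Int × List Int := (4, 2, [1, 2, 3])

def Spec_getFarthestPlace (capacity : Int) (current_place : Int) (residues : List Int) (out : Int) : Prop := out = getFarthestPlace_alt capacity current_place residues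
instance (capacity : Int) (current_place : Int) (residues : List Int) (out : Int) : Decidable (Spec_getFarthestPlace capacity current_place residues out) := by unfold Spec_getFarthestPlace; infer_instance

-- ===== CLAIM (what is proved, stated in full; the proofs are below) =====
def Claim_equal_getFarthestPlace : Prop := ∀ (capacity : Int) (current_place : Int) (residues : List Int), Dom_getFarthestPlace capacity current_place residues → Pre_getFarthestPlace capacity current_place residues → Spec_getFarthestPlace capacity current_place residues (getFarthestPlace capacity current_place residues)

-- ===== LEMMAS AND PROOFS =====

theorem pvSkipA_nonneg (residues : List Int) (i : Int) (h0 : 0 ≤ i) : 0 ≤ pvSkipA residues i := by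
  induction i using pvSkipA.induct residues with
  | case1 i h ih => rw [pvSkipA_step _ _ h.1 h.2]; exact ih (by omega)
  | case2 i h => rw [pvSkipA, dif_neg h]; exact h0

theorem pvGet_setD_ne (xs : List Int) (k v j : Int) (h0k : 0 ≤ k) (h0j : 0 ≤ j) (hne : j ≠ k) :
    PySem.List.pyGet? (PySem.List.pySetD xs k v) j = PySem.List.pyGet? xs j := by
  rw [PySem.List.pySetD_of_nonneg _ _ h0k, PySem.List.pyGet?_of_nonneg _ h0j,
    PySem.List.pyGet?_of_nonneg _ h0j]
  rw [List.getElem?_set_ne (by omega : k.toNat ≠ j.toNat)]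

theorem pvSkipA_agree (res₁ res₂ : List Int) : ∀ i : Int,
    (∀ k : Int, 0 ≤ k → k < i → PySem.List.pyGet? res₁ k = PySem.List.pyGet? res₂ k) →
    pvSkipA res₁ i = pvSkipA res₂ i := by
  intro i
  induction i using pvSkipA.induct res₁ with
  | case1 i h ih =>
      intro hag
      have h₂ : PySem.List.pyGet? res₂ (i - 1) = some 0 := by
        rw [← hag (i - 1) (by omega) (by omega)]; exact h.2
      rw [pvSkipA_step res₁ i h.1 h.2, pvSkipA_step res₂ i h.1 h₂]
      exact ih (fun k hk hk' => hag k hk (by omega))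
  | case2 i h =>
      intro hag
      rw [pvSkipA, dif_neg h, pvSkipA]
      rw [dif_neg ?_]
      rintro ⟨h1, h2⟩
      exact h ⟨h1, by rw [hag (i - 1) (by omega) (by omega)]; exact h2⟩

theorem pvLoopA_none (c i : Int) (residues : List Int) (h1 : 0 < i) (h2 : 0 < c)
    (hg : PySem.List.pyGet? residues (i - 1) = none) : pvLoopA c i residues = i := by
  rw [pvLoopA, dif_pos (And.intro h1 h2)]
  split
  · rfl
  · next r hr => rw [hg] at hr; cases hr

theorem pvLoopA_step (c i : Int) (residues : List Int) (h1 : 0 < i) (h2 : 0 < c) (r : Int)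
    (hg : PySem.List.pyGet? residues (i - 1) = some r) :
    pvLoopA c i residues =
      pvLoopA (c - min c r) (pvSkipA (PySem.List.pySetD residues (i - 1) (r - min c r)) i)
        (PySem.List.pySetD residues (i - 1) (r - min c r)) := by
  rw [pvLoopA, dif_pos (And.intro h1 h2)]
  split
  · next hnone => simp [hg] at hnone
  · next r' hr' => rw [hg] at hr'; injection hr' with hrr; subst hrr; rfl

theorem pvLoopA_agree : ∀ (n : Nat) (c i : Int) (res₁ res₂ : List Int), i.toNat ≤ n →
    (∀ k : Int, 0 ≤ k → k < i → PySem.List.pyGet? res₁ k = PySem.List.pyGet? res₂ k) →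
    pvLoopA c i res₁ = pvLoopA c i res₂ := by
  intro n
  induction n with
  | zero =>
      intro c i res₁ res₂ hn hag
      by_cases hg : 0 < i ∧ 0 < c
      · omega
      · rw [pvLoopA, dif_neg hg, pvLoopA, dif_neg hg]
  | succ n ih =>
      intro c i res₁ res₂ hn hag
      by_cases hg : 0 < i ∧ 0 < c
      · obtain ⟨h1, h2⟩ := hg
        cases hr : PySem.List.pyGet? res₁ (i - 1) with
        | none =>
            have hr₂ : PySem.List.pyGet? res₂ (i - 1) = none := by
              rw [← hag (i - 1) (by omega) (by omega)]; exact hr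
            rw [pvLoopA_none c i res₁ h1 h2 hr, pvLoopA_none c i res₂ h1 h2 hr₂]
        | some r =>
            have hr₂ : PySem.List.pyGet? res₂ (i - 1) = some r := by
              rw [← hag (i - 1) (by omega) (by omega)]; exact hr
            have hlen₁ : i - 1 < (res₁.length : Int) :=
              pvGet_inrange res₁ (i - 1) (by omega) (by simp [hr])
            have hlen₂ : i - 1 < (res₂.length : Int) :=
              pvGet_inrange res₂ (i - 1) (by omega) (by simp [hr₂])
            rw [pvLoopA_step c i res₁ h1 h2 r hr, pvLoopA_step c i res₂ h1 h2 r hr₂]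
            by_cases hrc : r ≤ c
            · rw [show (min c r) = r from by omega, show (r - r : Int) = 0 from by omega]
              set res₁' := PySem.List.pySetD res₁ (i - 1) (0 : Int) with hres₁'
              set res₂' := PySem.List.pySetD res₂ (i - 1) (0 : Int) with hres₂'
              have hag' : ∀ k : Int, 0 ≤ k → k < i - 1 →
                  PySem.List.pyGet? res₁' k = PySem.List.pyGet? res₂' k := by
                intro k hk hki
                rw [hres₁', hres₂', pvGet_setD_ne _ _ _ _ (by omega) hk (by omega),
                  pvGet_setD_ne _ _ _ _ (by omega) hk (by omega)]
                exact hag k hk (by omega)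
              have hz₁ : PySem.List.pyGet? res₁' (i - 1) = some 0 :=
                pvGet_setD_self res₁ (i - 1) 0 (by omega) hlen₁
              have hz₂ : PySem.List.pyGet? res₂' (i - 1) = some 0 :=
                pvGet_setD_self res₂ (i - 1) 0 (by omega) hlen₂
              rw [pvSkipA_step _ _ h1 hz₁, pvSkipA_step _ _ h1 hz₂]
              rw [pvSkipA_agree res₁' res₂' (i - 1) hag']
              set j := pvSkipA res₂' (i - 1) with hj
              have hjle : j ≤ i - 1 := pvSkipA_le res₂' (i - 1)
              have hj0 : 0 ≤ j := pvSkipA_nonneg res₂' (i - 1) (by omega)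
              exact ih (c - r) j res₁' res₂' (by omega)
                (fun k hk hki => hag' k hk (by omega))
            · have hz₁ : PySem.List.pyGet? (PySem.List.pySetD res₁ (i - 1) (r - min c r)) (i - 1)
                  = some (r - min c r) :=
                pvGet_setD_self res₁ (i - 1) _ (by omega) hlen₁
              have hz₂ : PySem.List.pyGet? (PySem.List.pySetD res₂ (i - 1) (r - min c r)) (i - 1)
                  = some (r - min c r) :=
                pvGet_setD_self res₂ (i - 1) _ (by omega) hlen₂
              rw [pvSkipA_stop _ _ _ hz₁ (by omega), pvSkipA_stop _ _ _ hz₂ (by omega)]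
              rw [show c - min c r = 0 from by omega]
              rw [pvLoopA, dif_neg (by omega : ¬ (0 < i ∧ (0:Int) < 0)),
                pvLoopA, dif_neg (by omega : ¬ (0 < i ∧ (0:Int) < 0))]
      · rw [pvLoopA, dif_neg hg, pvLoopA, dif_neg hg]

theorem pvScan_zero (c s : Int) (residues : List Int) (j : Int) (hj : ¬ 0 < j) :
    pvScan c s j residues = 0 := by
  rw [pvScan, dif_neg hj]

theorem pvScan_stop (c s j : Int) (residues : List Int) (h1 : 0 < j) (r : Int)
    (hg : PySem.List.pyGet? residues (j - 1) = some r)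
    (hc : r ≠ 0 ∧ (c ≤ s ∨ c < s + r)) : pvScan c s j residues = j := by
  rw [pvScan, dif_pos h1]
  split
  · next hnone => simp [hg] at hnone
  · next r' hr' => rw [hg] at hr'; injection hr' with hrr; subst hrr; rw [if_pos hc]

theorem pvScan_step (c s j : Int) (residues : List Int) (h1 : 0 < j) (r : Int)
    (hg : PySem.List.pyGet? residues (j - 1) = some r)
    (hc : ¬ (r ≠ 0 ∧ (c ≤ s ∨ c < s + r))) :
    pvScan c s j residues = pvScan c (s + r) (j - 1) residues := by
  rw [pvScan, dif_pos h1]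
  split
  · next hnone => simp [hg] at hnone
  · next r' hr' => rw [hg] at hr'; injection hr' with hrr; subst hrr; rw [if_neg hc]

-- scanning is insensitive to A's zero-skip: skipped places contribute 0 to the suffix sum
theorem pvScan_skip (c s : Int) (residues : List Int) : ∀ j : Int,
    pvScan c s (pvSkipA residues j) residues = pvScan c s j residues := by
  intro j
  induction j using pvSkipA.induct residues with
  | case1 j h ih =>
      rw [pvSkipA_step _ _ h.1 h.2, ih]
      rw [pvScan_step c s j residues h.1 0 h.2 (by simp)]
      rw [show s + 0 = s from by omega]
  | case2 j h => rw [pvSkipA, dif_neg h]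

-- once the suffix sum has reached capacity, the scan is exactly A's zero-skip
theorem pvScan_exhausted (c s : Int) (residues : List Int) : ∀ j : Int, c ≤ s → 0 ≤ j →
    j ≤ (residues.length : Int) → pvScan c s j residues = pvSkipA residues j := by
  intro j
  induction j using pvSkipA.induct residues with
  | case1 j h ih =>
      intro hcs h0 hl
      rw [pvSkipA_step _ _ h.1 h.2]
      rw [pvScan_step c s j residues h.1 0 h.2 (by simp)]
      rw [show s + 0 = s from by omega]
      exact ih hcs (by omega) (by omega)
  | case2 j h =>
      intro hcs h0 hl
      by_cases h1 : 0 < j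
      · have hrange : (j - 1).toNat < residues.length := by omega
        have hg : PySem.List.pyGet? residues (j - 1) = some residues[(j-1).toNat] := by
          rw [PySem.List.pyGet?_of_nonneg _ (by omega : (0:Int) ≤ j - 1)]
          exact List.getElem?_eq_getElem hrange
        have hnz : residues[(j-1).toNat] ≠ 0 := by
          intro hz; exact h ⟨h1, by rw [hg, hz]⟩
        rw [pvScan_stop c s j residues h1 _ hg ⟨hnz, Or.inl hcs⟩]
        rw [pvSkipA, dif_neg h]
      · have hj0 : j = 0 := by omega
        subst hj0
        rw [pvScan_zero c s residues 0 (by omega), pvSkipA, dif_neg h]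

theorem pvMain (n : Nat) : ∀ (i c s : Int) (residues : List Int), i.toNat ≤ n → 0 ≤ i →
    i ≤ (residues.length : Int) → s < c →
    pvLoopA (c - s) i residues = pvScan c s i residues := by
  induction n with
  | zero =>
      intro i c s residues hn h0 hl hcs
      have hi0 : i = 0 := by omega
      subst hi0
      rw [pvLoopA, dif_neg (by omega : ¬ ((0:Int) < 0 ∧ 0 < c - s)),
        pvScan_zero c s residues 0 (by omega)]
  | succ n ih =>
      intro i c s residues hn h0 hl hcs
      by_cases hi : 0 < i
      · have hrange : (i - 1).toNat < residues.length := by omega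
        have hg : PySem.List.pyGet? residues (i - 1) = some residues[(i-1).toNat] := by
          rw [PySem.List.pyGet?_of_nonneg _ (by omega : (0:Int) ≤ i - 1)]
          exact List.getElem?_eq_getElem hrange
        set r := residues[(i-1).toNat] with hrdef
        have hlen : i - 1 < (residues.length : Int) := by omega
        by_cases hcond : r ≠ 0 ∧ (c ≤ s ∨ c < s + r)
        · -- scan stops here; A consumes partially and stops too
          have hrc : ¬ r ≤ c - s := by
            rcases hcond.2 with h' | h' <;> [omega; omega]
          rw [pvScan_stop c s i residues hi r hg hcond]
          rw [pvLoopA_step (c - s) i residues hi (by omega) r hg]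
          rw [show min (c - s) r = c - s from by omega]
          have hz : PySem.List.pyGet? (PySem.List.pySetD residues (i - 1) (r - (c - s))) (i - 1)
              = some (r - (c - s)) :=
            pvGet_setD_self residues (i - 1) _ (by omega) hlen
          rw [pvSkipA_stop _ _ _ hz (by omega)]
          rw [pvLoopA, dif_neg (by omega : ¬ (0 < i ∧ 0 < c - s - (c - s)))]
        · -- full consumption: r ≤ remaining; step both sides
          have hrc : r ≤ c - s := by
            by_cases hr0 : r = 0
            · omega
            · have := hcond; push_neg at this; have h' := (this hr0).2; omega
          rw [pvScan_step c s i residues hi r hg hcond]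
          rw [pvLoopA_step (c - s) i residues hi (by omega) r hg]
          rw [show min (c - s) r = r from by omega, show r - r = (0:Int) from by omega]
          set res' := PySem.List.pySetD residues (i - 1) (0 : Int) with hres'
          have hz : PySem.List.pyGet? res' (i - 1) = some 0 :=
            pvGet_setD_self residues (i - 1) 0 (by omega) hlen
          rw [pvSkipA_step _ _ hi hz]
          have hag : ∀ k : Int, 0 ≤ k → k < i - 1 →
              PySem.List.pyGet? res' k = PySem.List.pyGet? residues k := by
            intro k hk hki
            exact pvGet_setD_ne residues (i - 1) 0 k (by omega) hk (by omega)
          rw [pvSkipA_agree res' residues (i - 1) hag]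
          set j := pvSkipA residues (i - 1) with hj
          have hjle : j ≤ i - 1 := pvSkipA_le residues (i - 1)
          have hj0 : 0 ≤ j := pvSkipA_nonneg residues (i - 1) (by omega)
          have hloopeq : pvLoopA (c - s - r) j res' = pvLoopA (c - s - r) j residues :=
            pvLoopA_agree (i - 1).toNat (c - s - r) j res' residues (by omega)
              (fun k hk hki => hag k hk (by omega))
          rw [hloopeq]
          by_cases hrem : s + r < c
          · have := ih j c (s + r) residues (by omega) hj0 (by omega) hrem
            rw [show c - s - r = c - (s + r) from by omega, this, hj, pvScan_skip]
          · rw [pvLoopA, dif_neg (by omega : ¬ (0 < j ∧ 0 < c - s - r))]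
            rw [pvScan_exhausted c (s + r) residues (i - 1) (by omega) (by omega) (by omega)]
      · have hi0 : i = 0 := by omega
        subst hi0
        rw [pvLoopA, dif_neg (by omega : ¬ ((0:Int) < 0 ∧ 0 < c - s)),
          pvScan_zero c s residues 0 (by omega)]

-- ===== VERDICT (by name: the statement is the Claim_ definition above) =====
theorem getFarthestPlace_spec : Claim_equal_getFarthestPlace := by
  intro capacity current_place residues _ hpre
  unfold Spec_getFarthestPlace getFarthestPlace getFarthestPlace_alt
  by_cases hc : capacity ≤ 0
  · rw [if_pos hc, pvLoopA, dif_neg (by omega : ¬ (0 < current_place ∧ 0 < capacity))]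
  · rw [if_neg hc]
    by_cases hcp : current_place = 0
    · subst hcp
      rw [pvLoopA, dif_neg (by omega : ¬ ((0:Int) < 0 ∧ 0 < capacity)),
        pvScan_zero capacity 0 residues 0 (by omega)]
    · have hb : 0 ≤ current_place ∧ current_place ≤ (residues.length : Int) := by
        rcases hpre with h | h | h
        · omega
        · exact absurd h hcp
        · exact ⟨h.1, by exact_mod_cast h.2⟩
      have := pvMain current_place.toNat current_place capacity 0 residues le_rfl hb.1 hb.2
        (by omega)
      rw [show capacity - 0 = capacity from by omega] at this
      exact this
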